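-- pv_equiv track=rewrite | github.com/zlaiyyf/dargonplus1.0.0 | spider/codeocr.py | get_bin_table
-- ===== SOURCE A (Python) =====
-- def get_bin_table(threshold=170):
--     """
--     获取灰度转二值的映射table
--     :param threshold:
--     :return:
--     """
--     table = []
--     for i in range(256):
--         if i < threshold:
--             table.append(0)
--         else:
--             table.append(1)
--     return table
-- ===== SOURCE B (Python) =====
-- def get_bin_table(threshold=170):
--     """
--     获取灰度转二值的映射table
--     :param threshold:
--     :return:
--     """
--     n = max(0, min(256, threshold))
--     return [0] * n + [1] * (256 - n)
-- ===== Notes on version B (the rewrite author's own statement) =====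
-- stated objective: simpler
-- what changed: Replaces the per-index compare-and-append loop with a closed form: clamp the threshold to the table's index range and concatenate a block of zeros with a block of ones, exploiting that the table is monotone.
import Mathlib
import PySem

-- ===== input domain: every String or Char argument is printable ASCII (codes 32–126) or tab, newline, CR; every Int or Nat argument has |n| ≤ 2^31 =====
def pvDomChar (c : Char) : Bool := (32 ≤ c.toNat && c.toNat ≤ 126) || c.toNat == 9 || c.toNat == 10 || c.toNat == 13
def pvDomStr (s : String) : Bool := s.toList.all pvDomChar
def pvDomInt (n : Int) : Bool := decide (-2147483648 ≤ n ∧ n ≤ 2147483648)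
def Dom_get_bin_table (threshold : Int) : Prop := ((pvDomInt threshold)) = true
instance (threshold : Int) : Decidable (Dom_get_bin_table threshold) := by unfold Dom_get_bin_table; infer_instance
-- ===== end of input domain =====

-- B replaces the per-index compare-and-append loop by a closed form: clamp the
-- threshold to the index range and concatenate a zero block with a one block (objective: simpler).


-- ===== PORT A =====
def get_bin_table (threshold : Int) : List Int :=
  (PySem.List.pyRange 0 256 1).foldl
    (fun table i => table ++ [if i < threshold then (0 : Int) else 1]) []

-- ===== PORT B =====
def get_bin_table_alt (threshold : Int) : List Int :=
  let n : Nat := (max 0 (min 256 threshold)).toNat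
  List.replicate n 0 ++ List.replicate (256 - n) 1

-- ===== PRECONDITION & SPEC =====
def Spec_get_bin_table (threshold : Int) (out : List Int) : Prop := out = get_bin_table_alt threshold
instance (threshold : Int) (out : List Int) : Decidable (Spec_get_bin_table threshold out) := by unfold Spec_get_bin_table; infer_instance

-- ===== CLAIM (what is proved, stated in full; the proofs are below) =====
def Claim_equal_get_bin_table : Prop := ∀ (threshold : Int), Dom_get_bin_table threshold → Spec_get_bin_table threshold (get_bin_table threshold)

-- ===== LEMMAS AND PROOFS =====

theorem foldl_append_singleton {α β : Type} (f : α → β) (l : List α) (acc : List β) :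
    l.foldl (fun t i => t ++ [f i]) acc = acc ++ l.map f := by
  induction l generalizing acc with
  | nil => simp
  | cons a l ih => simp [List.foldl_cons, ih, List.append_assoc]

theorem get_bin_table_eq_map (threshold : Int) :
    get_bin_table threshold
      = (List.range 256).map (fun k : Nat => if (k : Int) < threshold then (0 : Int) else 1) := by
  unfold get_bin_table
  rw [foldl_append_singleton, PySem.List.pyRange_one]
  simp only [List.nil_append, List.map_map]
  apply List.map_congr_left
  intro k _
  simp

theorem map_range_eq_rep (t : Int) (n : Nat) (h0 : n = (max 0 (min 256 t)).toNat) :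
    (List.range 256).map (fun k : Nat => if (k : Int) < t then (0 : Int) else 1)
      = List.replicate n 0 ++ List.replicate (256 - n) 1 := by
  have hn256 : n ≤ 256 := by omega
  apply List.ext_getElem
  · simp only [List.length_map, List.length_range, List.length_append, List.length_replicate]
    omega
  · intro i h1 h2
    have hi : i < 256 := by
      simp only [List.length_map, List.length_range] at h1; exact h1
    have hiff : ((i : Int) < t) ↔ i < n := by omega
    rw [List.getElem_map, List.getElem_range]
    by_cases hlt : i < n
    · rw [List.getElem_append_left (by simp only [List.length_replicate]; exact hlt)]
      rw [List.getElem_replicate, if_pos (hiff.mpr hlt)]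
    · rw [List.getElem_append_right (by simp only [List.length_replicate]; omega)]
      rw [List.getElem_replicate, if_neg (by omega)]

-- ===== VERDICT (by name: the statement is the Claim_ definition above) =====
theorem get_bin_table_spec : Claim_equal_get_bin_table := by
  intro threshold _
  show get_bin_table threshold = get_bin_table_alt threshold
  rw [get_bin_table_eq_map, map_range_eq_rep threshold _ rfl]
  rfl
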